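-- pv_equiv track=rewrite | github.com/NgaLe02/PYTHON_PTIT | Danh_Sach/ICPC0106.py | solve
-- ===== SOURCE A (Python) =====
-- p = "ABCDEF"
--
-- def base4(s):
--     num = ''
--     for i in range (0, len(s), 2):
--         tmp = 0
--         if s[i] == '1':
--             tmp += 2
--         if s[i + 1] == '1':
--             tmp += 1
--         num = num + str(tmp)
--     return num
--
-- def base8(s):
--     num = ''
--     for i in range (0, len(s), 3):
--         tmp = 0
--         if s[i] == '1':
--             tmp += 4
--         if s[i + 1] == '1':
--             tmp += 2
--         if s[i + 2] == '1':
--             tmp += 1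
--         num = num + str(tmp)
--     return num
--
-- def base16(s):
--     num = ''
--     for i in range (0, len(s), 4):
--         tmp = 0
--         if s[i] == '1':
--             tmp += 8
--         if s[i + 1] == '1':
--             tmp += 4
--         if s[i + 2] == '1':
--             tmp += 2
--         if s[i + 3] == '1':
--             tmp += 1
--         if tmp <= 9:
--             num = num + str(tmp)
--         else:
--             num = num + p[tmp - 10]
--     return num
--
-- def solve(n, b):
--     if b == 2:
--         return n;
--     if b == 4:
--         l = 2
--     elif b == 8:
--         l = 3
--     else:
--         l = 4
--     while len(n) % l != 0:
--         n = '0' + n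
--     if b == 4:
--         return base4(n)
--     elif b == 8:
--         return base8(n)
--     else:
--         return base16(n)
-- ===== SOURCE B (Python) =====
-- def solve(n, b):
--     if b == 2:
--         return n
--     l = 2 if b == 4 else 3 if b == 8 else 4
--     m = 2 ** l
--     v = 0
--     for c in n:
--         v = 2 * v + (c == '1')
--     k = (len(n) + l - 1) // l
--     digits = "0123456789ABCDEF"
--     out = ''
--     for _ in range(k):
--         out = digits[v % m] + out
--         v //= m
--     return out
-- ===== Notes on version B (the rewrite author's own statement) =====
-- stated objective: alternative
-- what changed: B does no padding and no per-chunk bit ladders: it folds the whole string once into one integer value, then emits exactly ceil(len/l) target-base digits back-to-front by repeated divmod (v % 2**l, v //= 2**l) with a digit table, whereas A prepends '0's one at a time and walks the string chunk by chunk with per-bit if-ladders.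
import Mathlib
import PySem

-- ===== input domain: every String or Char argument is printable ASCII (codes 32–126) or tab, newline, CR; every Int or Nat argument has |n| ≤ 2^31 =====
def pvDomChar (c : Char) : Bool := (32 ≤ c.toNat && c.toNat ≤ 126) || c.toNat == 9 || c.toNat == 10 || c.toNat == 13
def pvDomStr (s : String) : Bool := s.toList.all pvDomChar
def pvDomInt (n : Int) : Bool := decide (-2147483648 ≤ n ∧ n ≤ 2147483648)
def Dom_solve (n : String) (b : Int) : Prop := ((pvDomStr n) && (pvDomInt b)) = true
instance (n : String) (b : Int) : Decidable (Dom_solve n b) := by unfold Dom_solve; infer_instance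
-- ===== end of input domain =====

-- B replaces A's pad-then-chunk bit-ladder conversion by a numeric one: fold the whole string
-- into one integer, then emit ceil(len/l) base-2^l digits back-to-front by repeated divmod
-- (objective: alternative algorithm, same asymptotic cost).

-- ===== PORT A =====
-- while len(n) % l != 0: n = '0' + n   (the 0 < l conjunct is a totality guard; solve only calls l = 2,3,4)
def pvPadDec (l len : Nat) (h1 : 0 < l) (h2 : len % l ≠ 0) :
    (l - (len + 1) % l) % l < (l - len % l) % l := by
  have hr : len % l < l := Nat.mod_lt _ h1
  have hmod : (len + 1) % l = (len % l + 1) % l := by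
    conv_lhs => rw [← Nat.mod_add_mod]
  rcases Nat.lt_or_ge (len % l + 1) l with h | h
  · rw [hmod, Nat.mod_eq_of_lt h,
      Nat.mod_eq_of_lt (show l - (len % l + 1) < l by omega),
      Nat.mod_eq_of_lt (show l - len % l < l by omega)]
    omega
  · have he : len % l + 1 = l := by omega
    rw [hmod, he, Nat.mod_self, Nat.sub_zero, Nat.mod_self,
      Nat.mod_eq_of_lt (show l - len % l < l by omega)]
    omega

def pvPad (n : List Char) (l : Nat) : List Char :=
  if h : 0 < l ∧ n.length % l ≠ 0 then pvPad ('0' :: n) l else n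
termination_by (l - n.length % l) % l
decreasing_by simpa using pvPadDec l n.length h.1 h.2

def pvBase4Go (s : List Char) (i : Nat) (num : List Char) : List Char :=
  if h : i < s.length then
    let tmp : Int := 0
    let tmp := if s[i]? = some '1' then tmp + 2 else tmp
    let tmp := if s[i+1]? = some '1' then tmp + 1 else tmp
    pvBase4Go s (i + 2) (num ++ (PySem.Int.toStr tmp).toList)
  else num
termination_by s.length - i

def pvBase8Go (s : List Char) (i : Nat) (num : List Char) : List Char :=
  if h : i < s.length then
    let tmp : Int := 0
    let tmp := if s[i]? = some '1' then tmp + 4 else tmp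
    let tmp := if s[i+1]? = some '1' then tmp + 2 else tmp
    let tmp := if s[i+2]? = some '1' then tmp + 1 else tmp
    pvBase8Go s (i + 3) (num ++ (PySem.Int.toStr tmp).toList)
  else num
termination_by s.length - i

-- p = "ABCDEF"; p[tmp - 10] (in-range whenever reached from solve)
def pvBase16Go (s : List Char) (i : Nat) (num : List Char) : List Char :=
  if h : i < s.length then
    let tmp : Int := 0
    let tmp := if s[i]? = some '1' then tmp + 8 else tmp
    let tmp := if s[i+1]? = some '1' then tmp + 4 else tmp
    let tmp := if s[i+2]? = some '1' then tmp + 2 else tmp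
    let tmp := if s[i+3]? = some '1' then tmp + 1 else tmp
    let d := if tmp ≤ 9 then (PySem.Int.toStr tmp).toList
             else [PySem.List.pyGetD "ABCDEF".toList (tmp - 10) ' ']
    pvBase16Go s (i + 4) (num ++ d)
  else num
termination_by s.length - i

def solve (n : String) (b : Int) : String :=
  if b = 2 then n
  else
    let l : Nat := if b = 4 then 2 else if b = 8 then 3 else 4
    let n' := pvPad n.toList l
    if b = 4 then String.mk (pvBase4Go n' 0 [])
    else if b = 8 then String.mk (pvBase8Go n' 0 [])
    else String.mk (pvBase16Go n' 0 [])

-- ===== PORT B =====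
def pvDigits : List Char := "0123456789ABCDEF".toList

-- for _ in range(k): out = digits[v % m] + out; v //= m
-- (digits[v % m] ported as pyGetD with default ' '; the index is always in range when called
--  from solve_alt since v % 2^l < 16)
def pvAltGo (m : Int) : Nat → Int → List Char → List Char
  | 0, _, out => out
  | k + 1, v, out =>
      pvAltGo m k (PySem.Int.floordiv v m) (PySem.List.pyGetD pvDigits (PySem.Int.mod v m) ' ' :: out)

def solve_alt (n : String) (b : Int) : String :=
  if b = 2 then n
  else
    let l : Nat := if b = 4 then 2 else if b = 8 then 3 else 4
    let m : Int := (2 : Int) ^ l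
    let v : Int := n.toList.foldl (fun a c => 2 * a + (if c = '1' then 1 else 0)) 0
    -- k = (len(n) + l - 1) // l : both operands nonnegative, so Nat division is exact here
    let k : Nat := (n.toList.length + l - 1) / l
    String.mk (pvAltGo m k v [])

-- ===== PRECONDITION & SPEC =====
def Spec_solve (n : String) (b : Int) (out : String) : Prop := out = solve_alt n b
instance (n : String) (b : Int) (out : String) : Decidable (Spec_solve n b out) := by unfold Spec_solve; infer_instance

-- ===== CLAIM (what is proved, stated in full; the proofs are below) =====
def Claim_equal_solve : Prop := ∀ (n : String) (b : Int), Dom_solve n b → Spec_solve n b (solve n b)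

-- ===== LEMMAS AND PROOFS =====

-- binary value of a string (proof-side helper; '1' counts 1, anything else 0)
def pvBV (s : List Char) : Int :=
  s.foldl (fun a c => 2 * a + (if c = '1' then 1 else 0)) 0

theorem pvBV_acc (s : List Char) : ∀ a : Int,
    s.foldl (fun a c => 2 * a + (if c = '1' then 1 else 0)) a = a * 2 ^ s.length + pvBV s := by
  induction s with
  | nil => intro a; simp [pvBV]
  | cons c t ih =>
    intro a
    simp only [pvBV, List.foldl_cons, List.length_cons]
    rw [ih, ih]
    ring

theorem pvBV_nonneg (s : List Char) : 0 ≤ pvBV s := by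
  induction s with
  | nil => simp [pvBV]
  | cons c t ih =>
    show 0 ≤ pvBV (c :: t)
    unfold pvBV
    rw [List.foldl_cons, pvBV_acc]
    have : (0:Int) ≤ 2 * 0 + (if c = '1' then 1 else 0) := by split_ifs <;> norm_num
    have h2 : (0:Int) ≤ (2 * 0 + (if c = '1' then 1 else 0)) * 2 ^ t.length :=
      mul_nonneg this (by positivity)
    linarith [ih]

theorem pvBV_lt (s : List Char) : pvBV s < 2 ^ s.length := by
  induction s with
  | nil => simp [pvBV]
  | cons c t ih =>
    show pvBV (c :: t) < 2 ^ (c :: t).length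
    unfold pvBV
    rw [List.foldl_cons, pvBV_acc, List.length_cons]
    have hd : (2 * 0 + (if c = '1' then (1:Int) else 0)) ≤ 1 := by split_ifs <;> norm_num
    have : (2 * 0 + (if c = '1' then (1:Int) else 0)) * 2 ^ t.length ≤ 1 * 2 ^ t.length :=
      mul_le_mul_of_nonneg_right hd (by positivity)
    have hp : (2:Int) ^ (t.length + 1) = 2 ^ t.length + 2 ^ t.length := by ring
    rw [hp]
    have ih' : pvBV t < 2 ^ t.length := ih
    linarith

theorem pvBV_append (t c : List Char) : pvBV (t ++ c) = pvBV t * 2 ^ c.length + pvBV c := by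
  unfold pvBV
  rw [List.foldl_append, pvBV_acc]
  rfl

theorem pvBV_replicate (p : Nat) : pvBV (List.replicate p '0') = 0 := by
  induction p with
  | zero => simp [pvBV]
  | succ q ih =>
    unfold pvBV at *
    rw [List.replicate_succ, List.foldl_cons]
    simpa using ih

-- common spec: the chunk-wise digit string (0 < l is a totality guard)
def pvCM (l : Nat) (s : List Char) : List Char :=
  if h : 0 < l ∧ s ≠ [] then
    PySem.List.pyGetD pvDigits (pvBV (s.take l)) ' ' :: pvCM l (s.drop l)
  else []
termination_by s.length
decreasing_by
  have : 0 < s.length := List.length_pos_iff.mpr h.2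
  simp; omega

theorem pvCM_nil (l : Nat) : pvCM l [] = [] := by rw [pvCM]; simp

theorem pvCM_append (l : Nat) (hl : 0 < l) :
    ∀ (k : Nat) (t c : List Char), t.length = k * l → c.length = l →
      pvCM l (t ++ c) = pvCM l t ++ [PySem.List.pyGetD pvDigits (pvBV c) ' '] := by
  intro k
  induction k with
  | zero =>
    intro t c ht hc
    have : t = [] := List.eq_nil_of_length_eq_zero (by omega)
    subst this
    have hcne : c ≠ [] := by intro h; subst h; simp at hc; omega
    rw [List.nil_append, pvCM, dif_pos ⟨hl, hcne⟩, pvCM_nil]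
    rw [List.take_of_length_le (by omega), List.drop_of_length_le (by omega), pvCM_nil]
    simp
  | succ k ih =>
    intro t c ht hc
    have hsm : t.length = k * l + l := by rw [ht, Nat.succ_mul]
    have htne : t ≠ [] := by intro h; subst h; simp at hsm; omega
    have hlt : l ≤ t.length := by omega
    have hR : pvCM l t = PySem.List.pyGetD pvDigits (pvBV (t.take l)) ' ' :: pvCM l (t.drop l) := by
      rw [pvCM, dif_pos ⟨hl, htne⟩]
    rw [pvCM, dif_pos ⟨hl, by simp [htne]⟩, hR]
    rw [List.take_append, List.drop_append]
    rw [Nat.sub_eq_zero_of_le hlt, List.take_zero, List.append_nil, List.drop_zero]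
    rw [ih (t.drop l) c (by rw [List.length_drop]; omega) hc]
    simp

theorem pvAlt_eq_cm (l : Nat) (hl : 0 < l) :
    ∀ (k : Nat) (s : List Char) (out : List Char), s.length = k * l →
      pvAltGo ((2:Int) ^ l) k (pvBV s) out = pvCM l s ++ out := by
  intro k
  induction k with
  | zero =>
    intro s out hs
    have : s = [] := List.eq_nil_of_length_eq_zero (by omega)
    subst this
    rw [pvAltGo, pvCM_nil, List.nil_append]
  | succ k ih =>
    intro s out hs
    set t := s.take (k * l) with htdef
    set c := s.drop (k * l) with hcdef
    have hkl : k * l + l = s.length := by rw [hs, Nat.succ_mul]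
    have hts : s = t ++ c := (List.take_append_drop _ _).symm
    have htl : t.length = k * l := by
      rw [htdef, List.length_take]; omega
    have hcl : c.length = l := by
      rw [hcdef, List.length_drop]; omega
    have hm : (0:Int) < 2 ^ l := by positivity
    have hbc0 : 0 ≤ pvBV c := pvBV_nonneg c
    have hbclt : pvBV c < 2 ^ l := by have := pvBV_lt c; rwa [hcl] at this
    have hbt0 : 0 ≤ pvBV t := pvBV_nonneg t
    have hv : pvBV s = pvBV c + (2:Int) ^ l * pvBV t := by
      rw [hts, pvBV_append, hcl]; ring
    have hmod : PySem.Int.mod (pvBV s) ((2:Int) ^ l) = pvBV c := by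
      rw [PySem.Int.mod_eq_emod_of_pos hm, hv, Int.add_mul_emod_self_left,
        Int.emod_eq_of_lt hbc0 hbclt]
    have hdiv : PySem.Int.floordiv (pvBV s) ((2:Int) ^ l) = pvBV t := by
      rw [PySem.Int.floordiv_eq_ediv_of_pos hm, hv,
        Int.add_mul_ediv_left _ _ (by positivity : ((2:Int) ^ l) ≠ 0),
        Int.ediv_eq_zero_of_lt hbc0 hbclt, zero_add]
    rw [pvAltGo, hmod, hdiv, ih t _ htl]
    rw [hts, pvCM_append l hl k t c htl hcl]
    simp

theorem pvPad_mod (n : List Char) (l : Nat) (hl : 0 < l) : (pvPad n l).length % l = 0 := by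
  induction n using pvPad.induct (l := l) with
  | case1 n h ih => rw [pvPad, dif_pos h]; exact ih
  | case2 n h =>
    rw [pvPad, dif_neg h]
    by_contra hc
    exact h ⟨hl, hc⟩

theorem pvPadStep (l m : Nat) (hl : 0 < l) (hm : m % l ≠ 0) :
    (l - (m + 1) % l) % l + 1 = (l - m % l) % l := by
  have hr : m % l < l := Nat.mod_lt _ hl
  have hmod : (m + 1) % l = (m % l + 1) % l := by
    conv_lhs => rw [← Nat.mod_add_mod]
  rcases Nat.lt_or_ge (m % l + 1) l with h | h
  · rw [hmod, Nat.mod_eq_of_lt h, Nat.mod_eq_of_lt (show l - (m % l + 1) < l by omega),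
      Nat.mod_eq_of_lt (show l - m % l < l by omega)]
    omega
  · have he : m % l + 1 = l := by omega
    rw [hmod, he, Nat.mod_self, Nat.sub_zero, Nat.mod_self,
      Nat.mod_eq_of_lt (show l - m % l < l by omega)]
    omega

theorem pvPad_eq_nat (n : List Char) (l : Nat) (hl : 0 < l) :
    pvPad n l = List.replicate ((l - n.length % l) % l) '0' ++ n := by
  induction n using pvPad.induct (l := l) with
  | case1 n h ih =>
    rw [pvPad, dif_pos h, ih]
    simp only [List.length_cons]
    rw [← pvPadStep l n.length hl h.2, List.replicate_succ', List.append_assoc]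
    rfl
  | case2 n h =>
    rw [pvPad, dif_neg h]
    have h0 : n.length % l = 0 := by
      by_contra hc
      exact h ⟨hl, hc⟩
    rw [h0]
    simp [Nat.mod_self]

theorem pvBV_pad (n : List Char) (l : Nat) (hl : 0 < l) : pvBV (pvPad n l) = pvBV n := by
  rw [pvPad_eq_nat n l hl, pvBV_append, pvBV_replicate, zero_mul, zero_add]

theorem pvPad_len (n : List Char) (l : Nat) (hl : l = 2 ∨ l = 3 ∨ l = 4) :
    (pvPad n l).length = ((n.length + l - 1) / l) * l := by
  rw [pvPad_eq_nat n l (by omega)]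
  simp only [List.length_append, List.length_replicate]
  rcases hl with h | h | h <;> subst h <;> omega

theorem pvDrop2 (s : List Char) (i : Nat) (h1 : i + 1 < s.length) :
    (s.drop i).take 2 = [s[i], s[i + 1]] := by
  rw [List.drop_eq_getElem_cons (by omega), List.drop_eq_getElem_cons h1]
  rfl

theorem pvDrop3 (s : List Char) (i : Nat) (h2 : i + 2 < s.length) :
    (s.drop i).take 3 = [s[i], s[i + 1], s[i + 2]] := by
  rw [List.drop_eq_getElem_cons (by omega), List.drop_eq_getElem_cons (by omega),
    List.drop_eq_getElem_cons h2]
  rfl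

theorem pvDrop4 (s : List Char) (i : Nat) (h3 : i + 3 < s.length) :
    (s.drop i).take 4 = [s[i], s[i + 1], s[i + 2], s[i + 3]] := by
  rw [List.drop_eq_getElem_cons (by omega), List.drop_eq_getElem_cons (by omega),
    List.drop_eq_getElem_cons (by omega), List.drop_eq_getElem_cons h3]
  rfl

theorem pvBase4_eq_aux (s : List Char) (hs : s.length % 2 = 0) :
    ∀ (k i : Nat) (num : List Char), s.length - i ≤ k → i % 2 = 0 →
      pvBase4Go s i num = num ++ pvCM 2 (s.drop i) := by
  intro k
  induction k with
  | zero =>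
    intro i num hk hi
    rw [pvBase4Go, dif_neg (by omega), List.drop_of_length_le (by omega), pvCM_nil,
      List.append_nil]
  | succ k ih =>
    intro i num hk hi
    by_cases h : i < s.length
    · have h1 : i + 1 < s.length := by omega
      have hne : s.drop i ≠ [] := by simp; omega
      have hdd : (s.drop i).drop 2 = s.drop (i + 2) := by
        rw [List.drop_drop]
      have hR : pvCM 2 (s.drop i)
          = PySem.List.pyGetD pvDigits (pvBV [s[i], s[i + 1]]) ' ' :: pvCM 2 (s.drop (i + 2)) := by
        rw [pvCM, dif_pos ⟨by omega, hne⟩, hdd, pvDrop2 s i h1]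
      rw [pvBase4Go, dif_pos h, ih (i + 2) _ (by omega) (by omega), hR]
      rw [List.append_assoc]
      refine congrArg (num ++ ·) ?_
      have hone : ∀ (x : List Char) (y : Char), x = [y] →
          x ++ pvCM 2 (s.drop (i + 2)) = y :: pvCM 2 (s.drop (i + 2)) := by
        rintro x y rfl; rfl
      apply hone
      simp only [List.getElem?_eq_getElem h, List.getElem?_eq_getElem h1]
      by_cases c0h : s[i] = '1' <;> by_cases c1h : s[i + 1] = '1' <;>
        simp [c0h, c1h, pvBV] <;> decide
    · rw [pvBase4Go, dif_neg h, List.drop_of_length_le (by omega), pvCM_nil, List.append_nil]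

theorem pvBase8_eq_aux (s : List Char) (hs : s.length % 3 = 0) :
    ∀ (k i : Nat) (num : List Char), s.length - i ≤ k → i % 3 = 0 →
      pvBase8Go s i num = num ++ pvCM 3 (s.drop i) := by
  intro k
  induction k with
  | zero =>
    intro i num hk hi
    rw [pvBase8Go, dif_neg (by omega), List.drop_of_length_le (by omega), pvCM_nil,
      List.append_nil]
  | succ k ih =>
    intro i num hk hi
    by_cases h : i < s.length
    · have h1 : i + 1 < s.length := by omega
      have h2 : i + 2 < s.length := by omega
      have hne : s.drop i ≠ [] := by simp; omega
      have hdd : (s.drop i).drop 3 = s.drop (i + 3) := by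
        rw [List.drop_drop]
      have hR : pvCM 3 (s.drop i)
          = PySem.List.pyGetD pvDigits (pvBV [s[i], s[i + 1], s[i + 2]]) ' '
              :: pvCM 3 (s.drop (i + 3)) := by
        rw [pvCM, dif_pos ⟨by omega, hne⟩, hdd, pvDrop3 s i h2]
      rw [pvBase8Go, dif_pos h, ih (i + 3) _ (by omega) (by omega), hR]
      rw [List.append_assoc]
      refine congrArg (num ++ ·) ?_
      have hone : ∀ (x : List Char) (y : Char), x = [y] →
          x ++ pvCM 3 (s.drop (i + 3)) = y :: pvCM 3 (s.drop (i + 3)) := by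
        rintro x y rfl; rfl
      apply hone
      simp only [List.getElem?_eq_getElem h, List.getElem?_eq_getElem h1,
        List.getElem?_eq_getElem h2]
      by_cases c0h : s[i] = '1' <;> by_cases c1h : s[i + 1] = '1' <;>
        by_cases c2h : s[i + 2] = '1' <;> simp [c0h, c1h, c2h, pvBV] <;> decide
    · rw [pvBase8Go, dif_neg h, List.drop_of_length_le (by omega), pvCM_nil, List.append_nil]

theorem pvBase16_eq_aux (s : List Char) (hs : s.length % 4 = 0) :
    ∀ (k i : Nat) (num : List Char), s.length - i ≤ k → i % 4 = 0 →
      pvBase16Go s i num = num ++ pvCM 4 (s.drop i) := by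
  intro k
  induction k with
  | zero =>
    intro i num hk hi
    rw [pvBase16Go, dif_neg (by omega), List.drop_of_length_le (by omega), pvCM_nil,
      List.append_nil]
  | succ k ih =>
    intro i num hk hi
    by_cases h : i < s.length
    · have h1 : i + 1 < s.length := by omega
      have h2 : i + 2 < s.length := by omega
      have h3 : i + 3 < s.length := by omega
      have hne : s.drop i ≠ [] := by simp; omega
      have hdd : (s.drop i).drop 4 = s.drop (i + 4) := by
        rw [List.drop_drop]
      have hR : pvCM 4 (s.drop i)
          = PySem.List.pyGetD pvDigits (pvBV [s[i], s[i + 1], s[i + 2], s[i + 3]]) ' '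
              :: pvCM 4 (s.drop (i + 4)) := by
        rw [pvCM, dif_pos ⟨by omega, hne⟩, hdd, pvDrop4 s i h3]
      rw [pvBase16Go, dif_pos h, ih (i + 4) _ (by omega) (by omega), hR]
      rw [List.append_assoc]
      refine congrArg (num ++ ·) ?_
      have hone : ∀ (x : List Char) (y : Char), x = [y] →
          x ++ pvCM 4 (s.drop (i + 4)) = y :: pvCM 4 (s.drop (i + 4)) := by
        rintro x y rfl; rfl
      apply hone
      simp only [List.getElem?_eq_getElem h, List.getElem?_eq_getElem h1,
        List.getElem?_eq_getElem h2, List.getElem?_eq_getElem h3]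
      by_cases c0h : s[i] = '1' <;> by_cases c1h : s[i + 1] = '1' <;>
        by_cases c2h : s[i + 2] = '1' <;> by_cases c3h : s[i + 3] = '1' <;>
        simp [c0h, c1h, c2h, c3h, pvBV] <;> decide
    · rw [pvBase16Go, dif_neg h, List.drop_of_length_le (by omega), pvCM_nil, List.append_nil]

-- ===== VERDICT (by name: the statement is the Claim_ definition above) =====
theorem solve_spec : Claim_equal_solve := by
  intro n b _
  unfold Spec_solve solve solve_alt
  by_cases h2 : b = 2
  · simp [h2]
  · have key : ∀ l : Nat, l = 2 ∨ l = 3 ∨ l = 4 →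
        pvAltGo ((2:Int) ^ l) ((n.toList.length + l - 1) / l)
          (n.toList.foldl (fun a c => 2 * a + (if c = '1' then 1 else 0)) 0) []
          = pvCM l (pvPad n.toList l) := by
      intro l hl234
      have hl : 0 < l := by omega
      have hv : n.toList.foldl (fun a c => 2 * a + (if c = '1' then 1 else 0)) 0
          = pvBV (pvPad n.toList l) := by
        rw [pvBV_pad n.toList l hl]; rfl
      rw [hv, pvAlt_eq_cm l hl _ _ [] (pvPad_len n.toList l hl234), List.append_nil]
    by_cases h4 : b = 4
    · subst h4; norm_num
      rw [pvBase4_eq_aux (pvPad n.toList 2) (pvPad_mod _ _ (by omega)) _ 0 [] le_rfl rfl]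
      rw [List.drop_zero, List.nil_append]
      have k2 := key 2 (by norm_num)
      norm_num at k2
      rw [k2]
    · by_cases h8 : b = 8
      · subst h8; norm_num
        rw [pvBase8_eq_aux (pvPad n.toList 3) (pvPad_mod _ _ (by omega)) _ 0 [] le_rfl rfl]
        rw [List.drop_zero, List.nil_append]
        have k3 := key 3 (by norm_num)
        norm_num at k3
        rw [k3]
      · simp only [h2, h4, h8, if_false]
        rw [pvBase16_eq_aux (pvPad n.toList 4) (pvPad_mod _ _ (by omega)) _ 0 [] le_rfl rfl]
        rw [List.drop_zero, List.nil_append, ← key 4 (by norm_num)]
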